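-- pv_equiv track=rewrite | github.com/Nostoi/rom24-quickmud-python | mud/commands/build.py | _show_olc_cmds
-- ===== SOURCE A (Python) =====
-- def _show_olc_cmds(command_names: tuple[str, ...]) -> str:
--     # mirroring ROM src/olc.c:153-175 show_olc_cmds — 15 chars, 5 columns.
--     output = []
--     col = 0
--     for name in command_names:
--         output.append(f"{name:<15.15}")
--         col += 1
--         if col % 5 == 0:
--             output.append("\n\r")
--     if col % 5 != 0:
--         output.append("\n\r")
--     return "".join(output)
-- ===== SOURCE B (Python) =====
-- def _show_olc_cmds(command_names: tuple[str, ...]) -> str: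
--     # Process the names row by row: take slices of 5; every row (including a
--     # short last one) contributes exactly one "\n\r".
--     pieces = []
--     for i in range(0, len(command_names), 5):
--         pieces.extend(f"{name:<15.15}" for name in command_names[i:i + 5])
--         pieces.append("\n\r")
--     return "".join(pieces)
-- ===== Notes on version B (the rewrite author's own statement) =====
-- stated objective: simpler
-- what changed: Replaces the element-wise loop with a running column counter and a post-loop modulo check by a row-wise loop that slices off five names at a time and emits exactly one row terminator per slice.
import Mathlib
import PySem

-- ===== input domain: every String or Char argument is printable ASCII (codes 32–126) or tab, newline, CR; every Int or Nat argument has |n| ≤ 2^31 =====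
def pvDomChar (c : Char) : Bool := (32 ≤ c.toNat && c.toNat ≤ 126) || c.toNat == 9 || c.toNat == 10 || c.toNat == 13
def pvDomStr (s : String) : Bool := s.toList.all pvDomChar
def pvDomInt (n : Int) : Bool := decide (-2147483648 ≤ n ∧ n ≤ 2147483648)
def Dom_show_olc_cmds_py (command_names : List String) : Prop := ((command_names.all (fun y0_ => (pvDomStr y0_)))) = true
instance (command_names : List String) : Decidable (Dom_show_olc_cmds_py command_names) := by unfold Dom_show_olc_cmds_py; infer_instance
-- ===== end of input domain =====

-- B replaces A's element-wise loop with a running column counter and post-loop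
-- modulo check by a row-wise loop over slices of five names (objective: simpler).

-- f"{name:<15.15}": truncate to 15 chars, then pad right with spaces to width 15
def fmtName (s : String) : String :=
  let t := s.toList.take 15
  String.ofList (t ++ List.replicate (15 - t.length) ' ')

-- ===== PORT A =====
-- A's loop body: append formatted name, bump col, append "\n\r" when col hits a multiple of 5
def stepA (st : List String × Int) (name : String) : List String × Int :=
  let output := st.1 ++ [fmtName name]
  let col := st.2 + 1
  if col % 5 == 0 then (output ++ ["\n\r"], col) else (output, col)

def show_olc_cmds_py (command_names : List String) : String :=
  let st := command_names.foldl stepA ([], 0)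
  String.join (if st.2 % 5 != 0 then st.1 ++ ["\n\r"] else st.1)

-- ===== PORT B =====
-- Source B's loop body: extend with the formatted slice command_names[i:i+5], then one "\n\r"
def stepB (command_names : List String) (pieces : List String) (i : Int) : List String :=
  pieces ++ (PySem.List.slice command_names (some i) (some (i + 5))).map fmtName ++ ["\n\r"]

def show_olc_cmds_py_alt (command_names : List String) : String :=
  let pieces := (PySem.List.pyRange 0 command_names.length 5).foldl (stepB command_names) []
  String.join pieces

-- ===== PRECONDITION & SPEC =====
def Spec_show_olc_cmds_py (command_names : List String) (out : String) : Prop := out = show_olc_cmds_py_alt command_names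
instance (command_names : List String) (out : String) : Decidable (Spec_show_olc_cmds_py command_names out) := by unfold Spec_show_olc_cmds_py; infer_instance

-- ===== CLAIM (what is proved, stated in full; the proofs are below) =====
def Claim_equal_show_olc_cmds_py : Prop := ∀ (command_names : List String), Dom_show_olc_cmds_py command_names → Spec_show_olc_cmds_py command_names (show_olc_cmds_py command_names)

-- ===== LEMMAS AND PROOFS =====

-- common specification both loops are reduced to: rows of five formatted names,
-- one "\n\r" per row
def rowsSpec : List String → List String
  | [] => []
  | x :: rest =>
      ((x :: rest).take 5).map fmtName ++ ["\n\r"] ++ rowsSpec ((x :: rest).drop 5)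
  termination_by xs => xs.length
  decreasing_by simp [List.length_drop]

-- the post-loop finish of A's algorithm
def finA (st : List String × Int) : List String :=
  if st.2 % 5 != 0 then st.1 ++ ["\n\r"] else st.1

-- A-side invariant: starting A's loop at any multiple of 5, the finished piece
-- list is the accumulator followed by the rows
theorem finA_eq : ∀ (n : Nat) (xs : List String), xs.length ≤ n →
    ∀ (acc : List String) (k : Int),
      finA (List.foldl stepA (acc, 5 * k) xs) = acc ++ rowsSpec xs := by
  intro n
  induction n with
  | zero =>
      intro xs h acc k
      have : xs = [] := by
        cases xs with
        | nil => rfl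
        | cons a t => simp at h
      subst this
      have h0 : (5 * k) % 5 = 0 := by omega
      simp [finA, rowsSpec, h0]
  | succ n ih =>
      intro xs h acc k
      match xs with
      | [] =>
          have h0 : (5 * k) % 5 = 0 := by omega
          simp [finA, rowsSpec, h0]
      | [a] =>
          have h1 : (5 * k + 1) % 5 = 1 := by omega
          simp [finA, rowsSpec, stepA, h1]
      | [a, b] =>
          have h1 : (5 * k + 1) % 5 = 1 := by omega
          have h2 : (5 * k + 1 + 1) % 5 = 2 := by omega
          simp [finA, rowsSpec, stepA, h1, h2]
      | [a, b, c] =>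
          have h1 : (5 * k + 1) % 5 = 1 := by omega
          have h2 : (5 * k + 1 + 1) % 5 = 2 := by omega
          have h3 : (5 * k + 1 + 1 + 1) % 5 = 3 := by omega
          simp [finA, rowsSpec, stepA, h1, h2, h3]
      | [a, b, c, d] =>
          have h1 : (5 * k + 1) % 5 = 1 := by omega
          have h2 : (5 * k + 1 + 1) % 5 = 2 := by omega
          have h3 : (5 * k + 1 + 1 + 1) % 5 = 3 := by omega
          have h4 : (5 * k + 1 + 1 + 1 + 1) % 5 = 4 := by omega
          simp [finA, rowsSpec, stepA, h1, h2, h3, h4]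
      | a :: b :: c :: d :: e :: rest =>
          have h1 : (5 * k + 1) % 5 = 1 := by omega
          have h2 : (5 * k + 1 + 1) % 5 = 2 := by omega
          have h3 : (5 * k + 1 + 1 + 1) % 5 = 3 := by omega
          have h4 : (5 * k + 1 + 1 + 1 + 1) % 5 = 4 := by omega
          have h5 : (5 * k + 1 + 1 + 1 + 1 + 1) % 5 = 0 := by omega
          have hk : 5 * k + 1 + 1 + 1 + 1 + 1 = 5 * (k + 1) := by ring
          have hlen : rest.length ≤ n := by simp at h; omega
          have := ih rest hlen
            (acc ++ [fmtName a, fmtName b, fmtName c, fmtName d, fmtName e, "\n\r"]) (k + 1)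
          simp [List.foldl, stepA, h1, h2, h3, h4, hk] at this ⊢
          rw [this]
          simp [rowsSpec]

-- range(a, b, 5) peels its first element while a < b
theorem pyRange5_cons (a b : Int) (h : a < b) :
    PySem.List.pyRange a b 5 = a :: PySem.List.pyRange (a + 5) b 5 := by
  rw [PySem.List.pyRange_of_pos _ _ (by norm_num : (0:Int) < 5),
      PySem.List.pyRange_of_pos _ _ (by norm_num : (0:Int) < 5)]
  rw [if_pos h]
  by_cases h5 : a + 5 < b
  · rw [if_pos h5]
    have hm : (b - a + 5 - 1) / 5 = (b - (a + 5) + 5 - 1) / 5 + 1 := by omega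
    have hmn : ((b - a + 5 - 1) / 5).toNat = ((b - (a + 5) + 5 - 1) / 5).toNat + 1 := by omega
    rw [hmn, List.range_succ_eq_map]
    simp [List.map_map, Function.comp]
    intro x _
    ring
  · rw [if_neg h5]
    have : ((b - a + 5 - 1) / 5).toNat = 1 := by omega
    rw [this]
    simp

-- range(a, b, 5) is empty once b ≤ a
theorem pyRange5_nil (a b : Int) (h : b ≤ a) : PySem.List.pyRange a b 5 = [] := by
  rw [PySem.List.pyRange_of_pos _ _ (by norm_num : (0:Int) < 5)]
  rw [if_neg (by omega)]
  simp

-- B-side invariant: the fold over range(5k, len, 5) appends the rows of the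
-- names from position 5k on
theorem foldB_eq (full : List String) : ∀ (m : Nat) (k : Nat) (acc : List String),
    full.length ≤ 5 * k + m →
    List.foldl (stepB full) acc (PySem.List.pyRange (5 * (k : Int)) full.length 5)
      = acc ++ rowsSpec (full.drop (5 * k)) := by
  intro m
  induction m with
  | zero =>
      intro k acc h
      rw [pyRange5_nil _ _ (by omega)]
      have hd : full.drop (5 * k) = [] := by
        apply List.drop_eq_nil_of_le; omega
      simp [hd, rowsSpec]
  | succ m ih =>
      intro k acc h
      by_cases hlt : full.length ≤ 5 * k
      · rw [pyRange5_nil _ _ (by omega)]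
        have hd : full.drop (5 * k) = [] := by
          apply List.drop_eq_nil_of_le; omega
        simp [hd, rowsSpec]
      · rw [pyRange5_cons _ _ (by omega)]
        rw [List.foldl_cons]
        have hcast : (5 * (k : Int) + 5) = (5 * ((k + 1 : Nat) : Int)) := by push_cast; ring
        rw [hcast]
        rw [ih (k + 1) _ (by omega)]
        -- identify the slice with take 5 of the dropped suffix
        have hslice : PySem.List.slice full (some (5 * (k : Int))) (some (5 * (k : Int) + 5))
            = (full.drop (5 * k)).take 5 := by
          have : (5 * (k : Int)) = ((5 * k : Nat) : Int) := by push_cast; ring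
          rw [this, show (5:Int) = ((5:Nat):Int) from by norm_num,
              PySem.List.slice_natCast_add]
        -- unfold one row of rowsSpec at the nonempty suffix
        obtain ⟨y, ys, hy⟩ : ∃ y ys, full.drop (5 * k) = y :: ys := by
          cases hd : full.drop (5 * k) with
          | nil =>
              exfalso
              have := congrArg List.length hd
              simp at this
              omega
          | cons y ys => exact ⟨y, ys, rfl⟩
        have hdrop : full.drop (5 * (k + 1)) = (full.drop (5 * k)).drop 5 := by
          rw [List.drop_drop]; ring_nf
        rw [hdrop, hy]
        simp [stepB, hslice, hy, rowsSpec]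
-- ===== VERDICT (by name: the statement is the Claim_ definition above) =====
theorem show_olc_cmds_py_spec : Claim_equal_show_olc_cmds_py := by
  intro xs _
  unfold Spec_show_olc_cmds_py show_olc_cmds_py show_olc_cmds_py_alt
  have hA := finA_eq xs.length xs (le_refl _) [] 0
  simp only [mul_zero] at hA
  simp only [finA] at hA
  have hB := foldB_eq xs xs.length 0 [] (by omega)
  simp only [Nat.cast_zero, mul_zero, List.drop_zero, List.nil_append] at hB
  refine Eq.trans (congrArg String.join (by simpa using hA)) ?_
  exact (congrArg String.join hB).symm
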